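-- pv_equiv track=rewrite | github.com/hoya9802/Algorithm-Notes | 프로그래머스/2/12914. 멀리 뛰기/멀리 뛰기.py | solution
-- ===== SOURCE A (Python) =====
-- def solution(n):
--     d = [0] * (n+1)
--     if n == 1:
--         return 1
--     if n == 2:
--         return 2
--     else:
--         d[1] = 1; d[2] = 2
--         for i in range(3, n+1):
--             d[i] = d[i-2] + d[i-1]
--
--     return d[n] % 1234567
-- ===== SOURCE B (Python) =====
-- def solution(n):
--     # Fast-doubling Fibonacci mod 1234567: ways(n) = F(n+1) with F(0)=0, F(1)=1.
--     M = 1234567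
--
--     def fd(k):
--         # returns (F(k) % M, F(k+1) % M)
--         if k == 0:
--             return (0, 1)
--         a, b = fd(k // 2)
--         c = (a * ((2 * b - a) % M)) % M
--         d = (a * a + b * b) % M
--         if k % 2 == 0:
--             return (c, d)
--         return (d, (c + d) % M)
--
--     return fd(n + 1)[0]
-- ===== Notes on version B (the rewrite author's own statement) =====
-- stated objective: faster
-- what changed: Replaced the O(n) DP array of unbounded big integers with O(log n) fast-doubling of the Fibonacci recurrence, reducing mod 1234567 at every step.
import Mathlib
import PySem

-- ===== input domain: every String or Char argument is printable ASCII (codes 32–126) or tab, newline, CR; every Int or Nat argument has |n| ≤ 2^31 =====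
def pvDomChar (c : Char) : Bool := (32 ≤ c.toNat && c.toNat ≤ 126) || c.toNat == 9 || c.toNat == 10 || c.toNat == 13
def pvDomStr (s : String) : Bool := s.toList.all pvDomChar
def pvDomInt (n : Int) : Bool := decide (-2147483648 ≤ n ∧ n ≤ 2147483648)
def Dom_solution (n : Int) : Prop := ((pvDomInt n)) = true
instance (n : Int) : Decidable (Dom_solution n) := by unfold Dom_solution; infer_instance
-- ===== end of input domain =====

-- B replaces A's O(n) DP array (unreduced big integers) with fast-doubling of the
-- Fibonacci recurrence mod 1234567 — an asymptotically faster algorithm.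

-- ===== PORT A =====
-- d is Python's array-backed list; every index A uses (1, 2, i ∈ range(3,n+1), n) is
-- nonnegative and in range under Pre_, so .toNat / setIfInBounds / getD are exact there.
def solution (n : Int) : Int :=
  let d : Array Int := Array.replicate (n + 1).toNat 0    -- d = [0] * (n+1)
  if n = 1 then 1
  else if n = 2 then 2
  else
    let d := d.setIfInBounds (1:Int).toNat 1              -- d[1] = 1
    let d := d.setIfInBounds (2:Int).toNat 2              -- d[2] = 2
    let d := (PySem.List.pyRange 3 (n + 1) 1).foldl       -- for i in range(3, n+1): d[i] = d[i-2] + d[i-1]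
      (fun d i => d.setIfInBounds i.toNat
        (d.getD (i - 2).toNat 0 + d.getD (i - 1).toNat 0)) d
    PySem.Int.mod (d.getD n.toNat 0) 1234567              -- return d[n] % 1234567

-- ===== PORT B =====
-- fd(k) of Source B; Source B recurses on k // 2, here k : Nat (under Pre_ we have k = n+1 ≥ 2, and
-- for k ≥ 0 Nat's k / 2 and k % 2 agree with Python's k // 2 and k % 2)
def fdAux (k : Nat) : Int × Int :=
  if k = 0 then (0, 1)
  else
    let p := fdAux (k / 2)
    let a := p.1
    let b := p.2
    let c := PySem.Int.mod (a * PySem.Int.mod (2 * b - a) 1234567) 1234567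
    let d := PySem.Int.mod (a * a + b * b) 1234567
    if k % 2 = 0 then (c, d) else (d, PySem.Int.mod (c + d) 1234567)
decreasing_by exact Nat.div_lt_self (Nat.pos_of_ne_zero (by assumption)) (by norm_num)

def solution_alt (n : Int) : Int := (fdAux (n + 1).toNat).1

-- ===== PRECONDITION & SPEC =====
-- A raises IndexError (the assignment d[1] = 1 on a list of length ≤ 1) for every n ≤ 0
def Pre_solution (n : Int) : Prop := 1 ≤ n
instance (n : Int) : Decidable (Pre_solution n) := by unfold Pre_solution; infer_instance
def pvWitness_solution : Int := 5

def Spec_solution (n : Int) (out : Int) : Prop := out = solution_alt n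
instance (n : Int) (out : Int) : Decidable (Spec_solution n out) := by unfold Spec_solution; infer_instance

-- ===== CLAIM (what is proved, stated in full; the proofs are below) =====
def Claim_equal_solution : Prop := ∀ (n : Int), Dom_solution n → Pre_solution n → Spec_solution n (solution n)

-- ===== LEMMAS AND PROOFS =====

theorem fib_cast_two_mul (m : Nat) :
    (Nat.fib (2 * m) : Int) = (Nat.fib m : Int) * (2 * (Nat.fib (m+1) : Int) - (Nat.fib m : Int)) := by
  have hle : Nat.fib m ≤ 2 * Nat.fib (m + 1) := by
    have := Nat.fib_le_fib_succ (n := m); omega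
  rw [Nat.fib_two_mul, Nat.cast_mul, Nat.cast_sub hle]
  push_cast; ring

theorem fib_cast_two_mul_add_one (m : Nat) :
    (Nat.fib (2 * m + 1) : Int) = (Nat.fib m : Int) * (Nat.fib m : Int) + (Nat.fib (m+1) : Int) * (Nat.fib (m+1) : Int) := by
  rw [Nat.fib_two_mul_add_one]; push_cast; ring

theorem fdAux_spec (k : Nat) :
    fdAux k = (((Nat.fib k : Int) % 1234567), ((Nat.fib (k + 1) : Int) % 1234567)) := by
  induction k using Nat.strong_induction_on with
  | _ k ih =>
    rw [fdAux]
    by_cases h0 : k = 0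
    · subst h0; norm_num
    · simp only [h0, if_false]
      rw [ih (k / 2) (Nat.div_lt_self (Nat.pos_of_ne_zero h0) one_lt_two)]
      simp only [PySem.Int.mod_eq_emod_of_pos (by norm_num : (0:Int) < 1234567)]
      set m := k / 2 with hm
      set A : Int := (Nat.fib m : Int) with hA
      set B : Int := (Nat.fib (m+1) : Int) with hB
      have eA : (A % 1234567) ≡ A [ZMOD 1234567] := Int.emod_emod_of_dvd _ dvd_rfl
      have eB : (B % 1234567) ≡ B [ZMOD 1234567] := Int.emod_emod_of_dvd _ dvd_rfl
      have hc : (A % 1234567 * ((2 * (B % 1234567) - A % 1234567) % 1234567)) % 1234567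
          = (Nat.fib (2 * m) : Int) % 1234567 := by
        rw [fib_cast_two_mul]
        exact eA.mul ((Int.emod_emod_of_dvd _ dvd_rfl).trans (((Int.ModEq.refl 2).mul eB).sub eA))
      have hd : (A % 1234567 * (A % 1234567) + B % 1234567 * (B % 1234567)) % 1234567
          = (Nat.fib (2 * m + 1) : Int) % 1234567 := by
        rw [fib_cast_two_mul_add_one]
        exact (eA.mul eA).add (eB.mul eB)
      by_cases hpar : k % 2 = 0
      · have hk : k = 2 * m := by omega
        simp only [hc, hd, hk]
        norm_num
      · have hk : k = 2 * m + 1 := by omega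
        have he : ((Nat.fib (2*m) : Int) % 1234567 + (Nat.fib (2*m+1) : Int) % 1234567) % 1234567
            = (Nat.fib (2 * m + 2) : Int) % 1234567 := by
          have : (Nat.fib (2*m+2) : Int) = (Nat.fib (2*m) : Int) + (Nat.fib (2*m+1) : Int) := by
            rw [Nat.fib_add_two]; push_cast; ring
          rw [this]
          exact Int.ModEq.add (Int.emod_emod_of_dvd _ dvd_rfl) (Int.emod_emod_of_dvd _ dvd_rfl)
        simp only [hc, hd, hk, he]
        norm_num [Nat.mul_add_mod]

theorem solution_alt_eq (n : Int) (h : 1 ≤ n) :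
    solution_alt n = (Nat.fib (n.toNat + 1) : Int) % 1234567 := by
  show (fdAux (n + 1).toNat).1 = _
  rw [fdAux_spec, show (n + 1).toNat = n.toNat + 1 by omega]

theorem arr_getD (a : Array Int) (i : Nat) (d : Int) : a.getD i d = a.toList.getD i d := by
  simp only [Array.getD, List.getD]
  split
  · next h => rw [List.getElem?_eq_getElem (by simpa using h)]; simp
  · next h => rw [List.getElem?_eq_none (by simpa using le_of_not_gt h)]; rfl

-- A's Array fold, seen through toList, is the same fold on lists
theorem fold_toList (is : List Int) (d : Array Int) :
    ((is.foldl (fun d i => d.setIfInBounds i.toNat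
        (d.getD (i - 2).toNat 0 + d.getD (i - 1).toNat 0)) d).toList)
    = is.foldl (fun d i => d.set i.toNat
        (d.getD (i - 2).toNat 0 + d.getD (i - 1).toNat 0)) d.toList := by
  induction is generalizing d with
  | nil => rfl
  | cons i is ih =>
    simp only [List.foldl_cons]
    rw [ih, Array.toList_setIfInBounds, arr_getD, arr_getD]

-- loop invariant of A's DP loop: after iteration j the cells j-1 and j hold fib j and fib (j+1)
theorem loop_inv (m : Nat) (j : Nat) (h2 : 2 ≤ j) (hjm : j ≤ m) :
    let d0 := ((List.replicate (m + 1) (0:Int)).set 1 1).set 2 2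
    let dj := (PySem.List.pyRange 3 ((j:Int) + 1) 1).foldl
      (fun d i => d.set i.toNat
        (d.getD (i - 2).toNat 0 + d.getD (i - 1).toNat 0)) d0
    dj.length = m + 1 ∧ dj.getD (j-1) 0 = (Nat.fib j : Int) ∧ dj.getD j 0 = (Nat.fib (j+1) : Int) := by
  intro d0
  induction j, h2 using Nat.le_induction with
  | base =>
    intro dj
    have : dj = d0 := by
      show List.foldl _ _ _ = _
      rw [show ((2:Nat):Int) + 1 = 3 by norm_num, PySem.List.pyRange_one_eq_nil (by norm_num)]
      rfl
    rw [this]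
    refine ⟨by simp [d0], ?_, ?_⟩
    · show List.getD _ 1 0 = 1
      simp [d0, List.getD, (by omega : 1 < m + 1)]
    · show List.getD _ 2 0 = 2
      simp [d0, List.getD, (by omega : 2 < m + 1)]
  | succ j h2 ih =>
    intro dj1
    obtain ⟨hlen, hprev, hcur⟩ := ih (by omega)
    set step := fun (d : List Int) (i : Int) => d.set i.toNat
        (d.getD (i - 2).toNat 0 + d.getD (i - 1).toNat 0) with hstep
    set dj := (PySem.List.pyRange 3 ((j:Int) + 1) 1).foldl step d0 with hdj
    have hsplit : dj1 = step dj ((j:Int) + 1) := by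
      show List.foldl _ _ _ = _
      rw [show ((j+1:Nat):Int) + 1 = ((j:Int)+1) + 1 by push_cast; ring,
          PySem.List.pyRange_one_succ_right (by omega : (3:Int) ≤ (j:Int)+1),
          List.foldl_append]
      rfl
    have hset : step dj ((j:Int)+1) = dj.set (j+1) ((Nat.fib j : Int) + (Nat.fib (j+1) : Int)) := by
      rw [hstep]
      show dj.set ((j:Int)+1).toNat _ = _
      rw [show ((j:Int) + 1 - 2).toNat = j - 1 by omega,
          show ((j:Int) + 1 - 1).toNat = j by omega,
          show ((j:Int) + 1).toNat = j + 1 by omega,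
          hprev, hcur]
    have hfib : (Nat.fib j : Int) + (Nat.fib (j+1) : Int) = (Nat.fib (j+2) : Int) := by
      rw [Nat.fib_add_two]; push_cast; ring
    rw [hsplit, hset, hfib]
    refine ⟨by simp [hlen], ?_, ?_⟩
    · show List.getD _ (j+1-1) 0 = _
      simp only [Nat.add_sub_cancel, List.getD]
      rw [List.getElem?_set_ne (by omega)]
      simpa [List.getD] using hcur
    · show List.getD _ (j+1) 0 = _
      simp [List.getD, (by omega : j + 1 < dj.length)]

theorem solution_eq (n : Int) (h : 1 ≤ n) :
    solution n = (Nat.fib (n.toNat + 1) : Int) % 1234567 := by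
  by_cases h1 : n = 1
  · subst h1; decide
  by_cases h2 : n = 2
  · subst h2; decide
  have h3 : 3 ≤ n := by omega
  set m := n.toNat with hm
  have hn : n = (m : Int) := by omega
  have hm3 : 3 ≤ m := by omega
  obtain ⟨hlen, hprev, hcur⟩ := loop_inv m m (by omega) le_rfl
  show (let d : Array Int := Array.replicate (n + 1).toNat 0
        if n = 1 then 1 else if n = 2 then 2 else
          let d := d.setIfInBounds (1:Int).toNat 1
          let d := d.setIfInBounds (2:Int).toNat 2
          let d := (PySem.List.pyRange 3 (n + 1) 1).foldl
            (fun d i => d.setIfInBounds i.toNat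
              (d.getD (i - 2).toNat 0 + d.getD (i - 1).toNat 0)) d
          PySem.Int.mod (d.getD n.toNat 0) 1234567) = _
  simp only [h1, h2, if_false]
  rw [PySem.Int.mod_eq_emod_of_pos (by norm_num)]
  rw [arr_getD, fold_toList]
  rw [show (n+1).toNat = m + 1 by omega]
  have hbase : ((Array.replicate (m+1) (0:Int)).setIfInBounds (1:Int).toNat 1
      |>.setIfInBounds (2:Int).toNat 2).toList
      = ((List.replicate (m + 1) (0:Int)).set 1 1).set 2 2 := by
    rw [Array.toList_setIfInBounds, Array.toList_setIfInBounds, Array.toList_replicate]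
    rfl
  rw [hbase, hn, show ((m:Int)).toNat = m from by omega, hcur]

-- ===== VERDICT (by name: the statement is the Claim_ definition above) =====
theorem solution_spec : Claim_equal_solution := by
  intro n _ hpre
  unfold Spec_solution
  rw [solution_eq n hpre, solution_alt_eq n hpre]
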